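-- pv_equiv track=rewrite | github.com/navya2427-bot/Grief-companion | backend/ai.py | detect_risk
-- ===== SOURCE A (Python) =====
-- def detect_risk(text: str) -> str:
--     high_risk_words = [
--         "suicide",
--         "kill myself",
--         "end my life",
--         "no reason to live",
--         "i want to die"
--     ]
--     for w in high_risk_words:
--         if w in text.lower():
--             return "HIGH"
--     return "LOW"
-- ===== SOURCE B (Python) =====
-- _HIGH_RISK = ("suicide", "kill myself", "end my life", "no reason to live", "i want to die")
--
-- def detect_risk(text: str) -> str:
--     t = text.lower()
--     for i in range(len(t)):
--         if t.startswith(_HIGH_RISK, i):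
--             return "HIGH"
--     return "LOW"
-- ===== Notes on version B (the rewrite author's own statement) =====
-- stated objective: alternative
-- what changed: Replaced five separate full-text substring scans (one 'in' test per phrase) by a single left-to-right pass over the lowered text that checks at each position whether any phrase starts there via tuple startswith.
import Mathlib
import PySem

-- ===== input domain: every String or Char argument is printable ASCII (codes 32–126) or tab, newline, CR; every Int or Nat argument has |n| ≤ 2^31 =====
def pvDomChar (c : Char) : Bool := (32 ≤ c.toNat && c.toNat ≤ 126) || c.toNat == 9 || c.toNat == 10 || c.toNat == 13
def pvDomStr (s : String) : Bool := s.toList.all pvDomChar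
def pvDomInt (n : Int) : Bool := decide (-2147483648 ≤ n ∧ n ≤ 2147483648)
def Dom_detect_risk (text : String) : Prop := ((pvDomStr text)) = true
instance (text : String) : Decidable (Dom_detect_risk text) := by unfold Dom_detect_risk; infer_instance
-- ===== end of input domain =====

-- B replaces five separate per-phrase substring scans by one left-to-right pass
-- testing at each position whether any phrase starts there (alternative decomposition).


-- the five high-risk phrases (as character lists; shared literal data of both programs)
def pvPhrases : List (List Char) :=
  ["suicide".toList, "kill myself".toList, "end my life".toList,
   "no reason to live".toList, "i want to die".toList]

-- ===== PORT A =====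
-- A's loop: for w in high_risk_words: if w in text.lower(): return "HIGH"; return "LOW"
def pvALoop (t : List Char) : List (List Char) → String
  | [] => "LOW"
  | w :: ws => if PySem.Chars.isIn w t then "HIGH" else pvALoop t ws

def detect_risk (text : String) : String :=
  pvALoop (PySem.Chars.lower text.toList) pvPhrases

-- ===== PORT B =====
-- B's loop: for i in range(len(t)): if t.startswith(phrases, i): return "HIGH"; return "LOW"
-- (the suffix t[i:] is the structural-recursion state; startswith-with-tuple is the 'any' below)
def pvBScan : List Char → String
  | [] => "LOW"
  | c :: rest =>
      if pvPhrases.any (fun p => PySem.Chars.startswith (c :: rest) p) then "HIGH"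
      else pvBScan rest

def detect_risk_alt (text : String) : String :=
  pvBScan (PySem.Chars.lower text.toList)

-- ===== PRECONDITION & SPEC =====
def Spec_detect_risk (text : String) (out : String) : Prop := out = detect_risk_alt text
instance (text : String) (out : String) : Decidable (Spec_detect_risk text out) := by unfold Spec_detect_risk; infer_instance

-- ===== CLAIM (what is proved, stated in full; the proofs are below) =====
def Claim_equal_detect_risk : Prop := ∀ (text : String), Dom_detect_risk text → Spec_detect_risk text (detect_risk text)

-- ===== LEMMAS AND PROOFS =====

-- A's chain of 'in' tests is the 'any phrase occurs' predicate
lemma pvALoop_eq (t : List Char) (ws : List (List Char)) :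
    pvALoop t ws = if ws.any (fun w => PySem.Chars.isIn w t) then "HIGH" else "LOW" := by
  induction ws with
  | nil => simp [pvALoop]
  | cons w ws ih =>
      simp only [pvALoop, List.any_cons, ih]
      by_cases h : PySem.Chars.isIn w t <;> simp [h]

-- B's positional scan is the same predicate, by induction on the text
lemma pvBScan_eq (cs : List Char) :
    pvBScan cs = if pvPhrases.any (fun p => PySem.Chars.isIn p cs) then "HIGH" else "LOW" := by
  induction cs with
  | nil => decide
  | cons c rest ih =>
      have hcond : (pvPhrases.any fun p => PySem.Chars.isIn p (c :: rest)) =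
          ((pvPhrases.any fun p => PySem.Chars.startswith (c :: rest) p) ||
            pvPhrases.any fun p => PySem.Chars.isIn p rest) := by
        rw [Bool.eq_iff_iff]
        simp only [Bool.or_eq_true, List.any_eq_true]
        constructor
        · rintro ⟨p, hp, hin⟩
          rcases List.infix_cons_iff.mp ((PySem.Chars.isIn_iff_infix _ _).mp hin) with hpre | hinf
          · exact Or.inl ⟨p, hp, (PySem.Chars.startswith_iff _ _).mpr hpre⟩
          · exact Or.inr ⟨p, hp, (PySem.Chars.isIn_iff_infix _ _).mpr hinf⟩
        · rintro (⟨p, hp, hsw⟩ | ⟨p, hp, hin⟩)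
          · exact ⟨p, hp, (PySem.Chars.isIn_iff_infix _ _).mpr
              ((PySem.Chars.startswith_iff _ _).mp hsw).isInfix⟩
          · exact ⟨p, hp, (PySem.Chars.isIn_iff_infix _ _).mpr
              (((PySem.Chars.isIn_iff_infix _ _).mp hin).trans (List.suffix_cons c rest).isInfix)⟩
      simp only [pvBScan, ih, hcond]
      by_cases h : pvPhrases.any (fun p => PySem.Chars.startswith (c :: rest) p) <;> simp [h]

-- ===== VERDICT (by name: the statement is the Claim_ definition above) =====
theorem detect_risk_spec : Claim_equal_detect_risk := by
  intro text _
  show detect_risk text = detect_risk_alt text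
  rw [detect_risk, detect_risk_alt, pvALoop_eq, pvBScan_eq]
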